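-- pv_equiv track=rewrite | github.com/arch2kx/aronasay | src/aronasay.py | combine_side_by_side
-- ===== SOURCE A (Python) =====
-- def combine_side_by_side(arona_art, speech_bubble, gap=2):
--     """Combine Arona art and speech bubble side by side"""
--     arona_lines = arona_art.split('\n')
--     bubble_lines = speech_bubble.split('\n')
--
--     # Get dimensions
--     arona_width = max(len(line) for line in arona_lines) if arona_lines else 0
--     arona_height = len(arona_lines)
--     bubble_height = len(bubble_lines)
--
--     # Calculate vertical position to center bubble with Arona
--     # Center the bubble vertically
--     bubble_start = max(0, (arona_height - bubble_height) // 2)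
--
--     # Create combined output
--     result = []
--     for i in range(max(arona_height, bubble_start + bubble_height)):
--         # Arona part - CRITICAL: pad each line to arona_width for alignment
--         if i < arona_height:
--             arona_part = arona_lines[i].ljust(arona_width)
--         else:
--             arona_part = ' ' * arona_width
--
--         # Bubble part
--         if bubble_start <= i < bubble_start + bubble_height:
--             bubble_part = bubble_lines[i - bubble_start]
--         else:
--             bubble_part = ''
--
--         # Combine with gap
--         result.append(arona_part + ' ' * gap + bubble_part)
--
--     return '\n'.join(result)
-- ===== SOURCE B (Python) =====
-- def combine_side_by_side(arona_art, speech_bubble, gap=2):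
--     """Combine Arona art and speech bubble side by side (canvas overlay: stamp
--     art chars onto blank space rows, then append bubble suffixes)."""
--     arona_lines = arona_art.split('\n')
--     bubble_lines = speech_bubble.split('\n')
--
--     width = max(len(l) for l in arona_lines)
--     start = max(0, (len(arona_lines) - len(bubble_lines)) // 2)
--     total = max(len(arona_lines), start + len(bubble_lines))
--
--     blank = [' '] * width + [' '] * gap
--     canvas = [blank.copy() for _ in range(total)]
--     for r, line in enumerate(arona_lines):
--         for c, ch in enumerate(line):
--             canvas[r][c] = ch
--
--     rows = [''.join(row) for row in canvas]
--     for r, line in enumerate(bubble_lines):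
--         rows[start + r] += line
--     return '\n'.join(rows)
-- ===== Notes on version B (the rewrite author's own statement) =====
-- stated objective: alternative
-- what changed: Replaces A's per-index row loop with if/else parts by a canvas-overlay algorithm: allocate a grid of blank space rows, stamp the art character by character onto it, then mutate the bubble lines onto the right rows as suffixes.
import Mathlib
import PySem

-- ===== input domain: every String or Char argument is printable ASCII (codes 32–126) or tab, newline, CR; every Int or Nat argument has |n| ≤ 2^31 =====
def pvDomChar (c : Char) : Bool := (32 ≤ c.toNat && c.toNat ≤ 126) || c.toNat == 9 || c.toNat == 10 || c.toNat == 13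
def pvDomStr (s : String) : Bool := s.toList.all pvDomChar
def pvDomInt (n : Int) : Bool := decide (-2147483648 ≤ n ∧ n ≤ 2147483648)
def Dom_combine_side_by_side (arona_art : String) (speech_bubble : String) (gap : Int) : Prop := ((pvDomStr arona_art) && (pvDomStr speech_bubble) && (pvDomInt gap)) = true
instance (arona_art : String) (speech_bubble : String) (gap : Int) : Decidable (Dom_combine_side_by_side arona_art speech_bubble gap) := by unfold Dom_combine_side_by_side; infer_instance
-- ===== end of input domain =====

-- B replaces A's per-index row loop by a canvas overlay (stamp art chars onto blank rows, then append bubble suffixes); alternative algorithm, same cost.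

-- ===== PORT A =====
-- s.ljust(w) (exact: pad on the right with spaces to width w)
def pyLjust (s : List Char) (w : Nat) : List Char := s ++ List.replicate (w - s.length) ' '

-- max(len(line) for line in lines) if lines else 0 (lines from split – never empty, 0 unreachable)
def pyMaxLen (xs : List Nat) : Nat :=
  match PySem.List.max? xs (fun x => x) with
  | some m => m
  | none => 0

def combine_side_by_side (arona_art : String) (speech_bubble : String) (gap : Int) : String :=
  let arona_lines := PySem.Chars.splitOn arona_art.toList ['\n']
  let bubble_lines := PySem.Chars.splitOn speech_bubble.toList ['\n']
  let arona_width := pyMaxLen (arona_lines.map List.length)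
  let arona_height : Int := arona_lines.length
  let bubble_height : Int := bubble_lines.length
  let bubble_start : Int := max 0 (PySem.Int.floordiv (arona_height - bubble_height) 2)
  let result := (PySem.List.pyRange 0 (max arona_height (bubble_start + bubble_height)) 1).foldl
    (fun res i =>
      let arona_part := if i < arona_height then pyLjust (PySem.List.pyGetD arona_lines i []) arona_width
                        else List.replicate arona_width ' '
      let bubble_part := if bubble_start ≤ i ∧ i < bubble_start + bubble_height
                         then PySem.List.pyGetD bubble_lines (i - bubble_start) []
                         else []
      res ++ [arona_part ++ List.replicate gap.toNat ' ' ++ bubble_part]) []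
  String.ofList (PySem.Chars.join ['\n'] result)

-- ===== PORT B =====
-- inner loop 'for c, ch in enumerate(line): canvas_row[c] = ch' (index always in range)
def pvStampLine : List Char → Nat → List Char → List Char
  | row, _, [] => row
  | row, c, ch :: rest => pvStampLine (row.set c ch) (c + 1) rest

-- outer loop 'for r, line in enumerate(arona_lines): …' stamping each line onto canvas row r
def pvStampRows : List (List Char) → Nat → List (List Char) → List (List Char)
  | cv, _, [] => cv
  | cv, r, line :: rest => pvStampRows (cv.set r (pvStampLine (cv.getD r []) 0 line)) (r + 1) rest

-- loop 'for r, line in enumerate(bubble_lines): rows[start + r] += line' (index always in range)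
def pvAppendRows : List (List Char) → Nat → List (List Char) → List (List Char)
  | rs, _, [] => rs
  | rs, r, line :: rest => pvAppendRows (rs.set r (rs.getD r [] ++ line)) (r + 1) rest

def combine_side_by_side_alt (arona_art : String) (speech_bubble : String) (gap : Int) : String :=
  let arona_lines := PySem.Chars.splitOn arona_art.toList ['\n']
  let bubble_lines := PySem.Chars.splitOn speech_bubble.toList ['\n']
  let width := pyMaxLen (arona_lines.map List.length)
  -- start = max(0, …) is nonnegative, so .toNat is exact
  let start : Nat := (max 0 (PySem.Int.floordiv ((arona_lines.length : Int) - (bubble_lines.length : Int)) 2)).toNat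
  let total : Nat := max arona_lines.length (start + bubble_lines.length)
  let blank := List.replicate width ' ' ++ List.replicate gap.toNat ' '
  let canvas := pvStampRows (List.replicate total blank) 0 arona_lines
  -- rows = [''.join(row) for row in canvas] is the identity on List Char rows
  let rows := pvAppendRows canvas start bubble_lines
  String.ofList (PySem.Chars.join ['\n'] rows)

-- ===== PRECONDITION & SPEC =====
def Spec_combine_side_by_side (arona_art : String) (speech_bubble : String) (gap : Int) (out : String) : Prop := out = combine_side_by_side_alt arona_art speech_bubble gap
instance (arona_art : String) (speech_bubble : String) (gap : Int) (out : String) : Decidable (Spec_combine_side_by_side arona_art speech_bubble gap out) := by unfold Spec_combine_side_by_side; infer_instance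

-- ===== CLAIM (what is proved, stated in full; the proofs are below) =====
def Claim_equal_combine_side_by_side : Prop := ∀ (arona_art : String) (speech_bubble : String) (gap : Int), Dom_combine_side_by_side arona_art speech_bubble gap → Spec_combine_side_by_side arona_art speech_bubble gap (combine_side_by_side arona_art speech_bubble gap)

-- ===== LEMMAS AND PROOFS =====

-- Stamping a line at offset c overwrites row[c .. c+len) with the line.
lemma pvStampLine_eq (line : List Char) : ∀ (row : List Char) (c : Nat),
    c + line.length ≤ row.length →
    pvStampLine row c line = row.take c ++ line ++ row.drop (c + line.length) := by
  induction line with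
  | nil => intro row c _; simp [pvStampLine]
  | cons ch rest ih =>
    intro row c h
    simp only [List.length_cons] at h
    have hc : c < row.length := by omega
    rw [pvStampLine, ih (row.set c ch) (c + 1) (by simp; omega)]
    have h1 : (row.set c ch).take (c + 1) = row.take c ++ [ch] := by
      rw [List.set_eq_take_cons_drop ch hc, List.take_append]
      simp [List.length_take, Nat.min_eq_left hc.le]
    have h2 : (row.set c ch).drop (c + 1 + rest.length) = row.drop (c + 1 + rest.length) := by
      apply List.ext_getElem (by simp)
      intro i hi1 hi2
      rw [List.getElem_drop, List.getElem_drop, List.getElem_set_ne (by omega)]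
    rw [h1, h2]
    have h3 : c + (ch :: rest).length = c + 1 + rest.length := by simp; omega
    rw [h3, List.append_assoc]
    simp

-- Stamping the lines onto a canvas whose rows from position pre.length on are all blank.
lemma pvStampRows_eq (lines : List (List Char)) : ∀ (pre : List (List Char)) (m : Nat)
    (blank : List Char), lines.length ≤ m →
    pvStampRows (pre ++ List.replicate m blank) pre.length lines
      = pre ++ lines.map (fun l => pvStampLine blank 0 l) ++ List.replicate (m - lines.length) blank := by
  induction lines with
  | nil => intro pre m blank _; simp [pvStampRows]
  | cons l ls ih =>
    intro pre m blank h
    simp only [List.length_cons] at h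
    obtain ⟨m', rfl⟩ : ∃ m', m = m' + 1 := ⟨m - 1, by omega⟩
    have hrep : List.replicate (m' + 1) blank = blank :: List.replicate m' blank := by
      simp [List.replicate_succ]
    rw [pvStampRows, hrep]
    have hgetD : (pre ++ blank :: List.replicate m' blank).getD pre.length [] = blank := by
      simp [List.getD_eq_getElem?_getD]
    have hset : (pre ++ blank :: List.replicate m' blank).set pre.length
        (pvStampLine blank 0 l) = (pre ++ [pvStampLine blank 0 l]) ++ List.replicate m' blank := by
      simp
    rw [hgetD, hset]
    have := ih (pre ++ [pvStampLine blank 0 l]) m' blank (by omega)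
    simp only [List.length_append, List.length_cons, List.length_nil, Nat.zero_add] at this
    rw [this]
    simp [List.append_assoc]

-- Appending the lines onto rows pre.length .. pre.length + lines.length.
lemma pvAppendRows_eq (lines : List (List Char)) : ∀ (pre mid post : List (List Char)),
    mid.length = lines.length →
    pvAppendRows (pre ++ mid ++ post) pre.length lines
      = pre ++ List.zipWith (· ++ ·) mid lines ++ post := by
  induction lines with
  | nil =>
    intro pre mid post h
    have hmid : mid = [] := List.eq_nil_of_length_eq_zero (by simpa using h)
    subst hmid
    simp [pvAppendRows]
  | cons l ls ih =>
    intro pre mid post h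
    match mid with
    | [] => simp at h
    | x :: mt =>
      simp only [List.length_cons] at h
      have hgetD : (pre ++ (x :: mt) ++ post).getD pre.length [] = x := by
        simp [List.getD_eq_getElem?_getD, List.append_assoc]
      have hset : (pre ++ (x :: mt) ++ post).set pre.length (x ++ l)
          = (pre ++ [x ++ l]) ++ mt ++ post := by
        simp [List.append_assoc]
      rw [pvAppendRows, hgetD, hset]
      have := ih (pre ++ [x ++ l]) mt post (by omega)
      simp only [List.length_append, List.length_cons, List.length_nil, Nat.zero_add] at this
      rw [this]
      simp [List.append_assoc]

-- Every line of a nonempty list is at most pyMaxLen of the lengths.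
lemma len_le_pyMaxLen (al : List (List Char)) (l : List Char) (hm : l ∈ al) :
    l.length ≤ pyMaxLen (al.map List.length) := by
  unfold pyMaxLen
  cases hmax : PySem.List.max? (al.map List.length) (fun x => x) with
  | none =>
    rw [PySem.List.max?_eq_none_iff, List.map_eq_nil_iff] at hmax
    subst hmax
    simp at hm
  | some m =>
    exact PySem.List.max?_isMax hmax _ (List.mem_map_of_mem hm)

-- The row lists of the two programs coincide, for arbitrary line lists and gap width.
lemma rows_eq (al bl : List (List Char)) (g : Nat) :
    (PySem.List.pyRange 0 (max (al.length : Int) (max 0 (PySem.Int.floordiv ((al.length : Int) - (bl.length : Int)) 2) + (bl.length : Int))) 1).map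
      (fun i =>
        (if i < (al.length : Int) then pyLjust (PySem.List.pyGetD al i []) (pyMaxLen (al.map List.length)) else List.replicate (pyMaxLen (al.map List.length)) ' ')
        ++ List.replicate g ' ' ++
        (if max 0 (PySem.Int.floordiv ((al.length : Int) - (bl.length : Int)) 2) ≤ i ∧
            i < max 0 (PySem.Int.floordiv ((al.length : Int) - (bl.length : Int)) 2) + (bl.length : Int)
         then PySem.List.pyGetD bl (i - max 0 (PySem.Int.floordiv ((al.length : Int) - (bl.length : Int)) 2)) []
         else []))
    = pvAppendRows
        (pvStampRows
          (List.replicate (max al.length ((max 0 (PySem.Int.floordiv ((al.length : Int) - (bl.length : Int)) 2)).toNat + bl.length))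
            (List.replicate (pyMaxLen (al.map List.length)) ' ' ++ List.replicate g ' '))
          0 al)
        (max 0 (PySem.Int.floordiv ((al.length : Int) - (bl.length : Int)) 2)).toNat bl := by
  set w : Nat := pyMaxLen (al.map List.length) with hw
  set s : Int := max 0 (PySem.Int.floordiv ((al.length : Int) - (bl.length : Int)) 2) with hs
  have hs0 : 0 ≤ s := le_max_left _ _
  set sN : Nat := s.toNat with hsN
  have hcast : (sN : Int) = s := Int.toNat_of_nonneg hs0
  set total : Nat := max al.length (sN + bl.length) with htot
  have hT : max (al.length : Int) (s + (bl.length : Int)) = (total : Int) := by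
    rw [htot, ← hcast]; push_cast; omega
  set blank : List Char := List.replicate w ' ' ++ List.replicate g ' ' with hblank
  have halT : al.length ≤ total := le_max_left _ _
  have hsbT : sN + bl.length ≤ total := le_max_right _ _
  -- stamped canvas
  have hcv : pvStampRows (List.replicate total blank) 0 al
      = al.map (fun l => pvStampLine blank 0 l) ++ List.replicate (total - al.length) blank := by
    have := pvStampRows_eq al [] total blank halT
    simpa using this
  -- each stamped row is the ljust'd line followed by the gap spaces
  have hstamp : ∀ l ∈ al, pvStampLine blank 0 l = pyLjust l w ++ List.replicate g ' ' := by
    intro l hl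
    have hlw : l.length ≤ w := len_le_pyMaxLen al l hl
    rw [pvStampLine_eq l blank 0 (by simp [hblank]; omega)]
    simp only [List.take_zero, Nat.zero_add, List.nil_append, hblank]
    rw [List.drop_append_of_le_length (by simp [hlw]), List.drop_replicate]
    simp [pyLjust]
  -- the base row list L
  set L : List (List Char) :=
    al.map (fun l => pvStampLine blank 0 l) ++ List.replicate (total - al.length) blank with hL
  have hLlen : L.length = total := by simp [hL]; omega
  -- split L around the bubble band
  have hsplit : L = L.take sN ++ (L.drop sN).take bl.length ++ L.drop (sN + bl.length) := by
    rw [← List.take_add, List.take_append_drop]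
  have happ : pvAppendRows L sN bl
      = L.take sN ++ List.zipWith (· ++ ·) ((L.drop sN).take bl.length) bl ++ L.drop (sN + bl.length) := by
    have hlen1 : (L.take sN).length = sN := by
      rw [List.length_take]; omega
    have hlen2 : ((L.drop sN).take bl.length).length = bl.length := by
      rw [List.length_take, List.length_drop]; omega
    have := pvAppendRows_eq bl (L.take sN) ((L.drop sN).take bl.length) (L.drop (sN + bl.length)) hlen2
    rw [hlen1] at this
    rw [← this, ← hsplit]
  have hLget : ∀ i (h : i < total), L[i]'(by omega) =
      if i < al.length then pvStampLine blank 0 (al.getD i []) else blank := by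
    intro i h
    by_cases hi : i < al.length
    · simp only [hL]
      rw [List.getElem_append_left (by simpa using hi), List.getElem_map, if_pos hi,
          List.getD_eq_getElem _ _ hi]
    · simp only [hL]
      rw [List.getElem_append_right (by simpa using Nat.le_of_not_lt hi),
          List.getElem_replicate, if_neg hi]
  rw [hcv, happ, hT]
  apply List.ext_getElem
  · simp [PySem.List.length_pyRange_one, List.length_take, List.length_drop, hLlen]
    omega
  · intro i h1 h2
    have hiT : i < total := by
      simpa [PySem.List.length_pyRange_one] using h1
    rw [List.getElem_map, PySem.List.getElem_pyRange_one]
    simp only [Int.zero_add]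
    by_cases hi1 : i < sN
    · -- before the bubble band
      rw [List.getElem_append_left (by simp [List.length_take, List.length_zipWith, List.length_drop, hLlen]; omega),
          List.getElem_append_left (by rw [List.length_take]; omega),
          List.getElem_take, hLget i hiT,
          if_neg (show ¬(s ≤ (i : Int) ∧ (i : Int) < s + (bl.length : Int)) by
            rw [← hcast]; omega)]
      by_cases hia : i < al.length
      · rw [if_pos (show ((i : Int) < (al.length : Int)) by exact_mod_cast hia),
            if_pos hia, PySem.List.pyGetD_natCast,
            hstamp _ (show al.getD i [] ∈ al by
              rw [List.getD_eq_getElem _ _ hia]; exact List.getElem_mem hia)]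
        simp
      · rw [if_neg (show ¬((i : Int) < (al.length : Int)) by exact_mod_cast hia),
            if_neg hia, hblank]
        simp
    · by_cases hi2 : i < sN + bl.length
      · -- inside the bubble band
        rw [List.getElem_append_left (by simp [List.length_take, List.length_drop, hLlen]; omega),
            List.getElem_append_right (by rw [List.length_take]; omega)]
        have hlt : (List.take sN L).length = sN := by rw [List.length_take]; omega
        rw [List.getElem_zipWith, List.getElem_take, List.getElem_drop]
        simp only [hlt]
        have hidx : sN + (i - sN) = i := by omega
        simp only [hidx]
        rw [hLget i hiT]
        have hbidx : (i : Int) - s = ((i - sN : Nat) : Int) := by rw [← hcast]; omega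
        rw [if_pos (show (s ≤ (i : Int) ∧ (i : Int) < s + (bl.length : Int)) by
              rw [← hcast]; constructor <;> omega),
            hbidx, PySem.List.pyGetD_natCast, PySem.List.pyGetD_natCast,
            List.getD_eq_getElem bl [] (show i - sN < bl.length by omega)]
        by_cases hia : i < al.length
        · rw [if_pos (show ((i : Int) < (al.length : Int)) by exact_mod_cast hia),
              if_pos hia,
              hstamp _ (show al.getD i [] ∈ al by
                rw [List.getD_eq_getElem _ _ hia]; exact List.getElem_mem hia)]
        · rw [if_neg (show ¬((i : Int) < (al.length : Int)) by exact_mod_cast hia),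
              if_neg hia, hblank]
      · -- after the bubble band
        have hlen12 : (List.take sN L ++
            List.zipWith (· ++ ·) ((L.drop sN).take bl.length) bl).length = sN + bl.length := by
          simp [List.length_take, List.length_drop, hLlen]
          omega
        rw [List.getElem_append_right (by rw [hlen12]; omega), List.getElem_drop]
        simp only [hlen12]
        have hidx : sN + bl.length + (i - (sN + bl.length)) = i := by omega
        simp only [hidx]
        rw [hLget i hiT,
            if_neg (show ¬(s ≤ (i : Int) ∧ (i : Int) < s + (bl.length : Int)) by
              rw [← hcast]; omega)]
        by_cases hia : i < al.length
        · rw [if_pos (show ((i : Int) < (al.length : Int)) by exact_mod_cast hia),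
              if_pos hia, PySem.List.pyGetD_natCast,
              hstamp _ (show al.getD i [] ∈ al by
                rw [List.getD_eq_getElem _ _ hia]; exact List.getElem_mem hia)]
          simp
        · rw [if_neg (show ¬((i : Int) < (al.length : Int)) by exact_mod_cast hia),
              if_neg hia, hblank]
          simp

-- ===== VERDICT (by name: the statement is the Claim_ definition above) =====
theorem combine_side_by_side_spec : Claim_equal_combine_side_by_side := by
  intro a b g _
  unfold Spec_combine_side_by_side
  simp only [combine_side_by_side, combine_side_by_side_alt,
    PySem.List.foldl_append_singleton_eq_map, List.nil_append]
  exact congrArg _ (congrArg _ (rows_eq _ _ _))
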